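-- pv_equiv track=rewrite | github.com/menynexi/CS3-Solutions-only | CS3 Solutions/intro_python_solutions(1).py | replace_max_array
-- ===== SOURCE A (Python) =====
-- def replace_max_array(A,x):
--     A_second = A.copy()
--     x_coord, y_coord = 0,0
--     prov_x, prov_y = 0,0
--     maximum = float("-inf")
--     for l in A:
--         prov_y = 0
--         for elemen in l:
--             if elemen > maximum:
--                 maximum = elemen
--                 x_coord = prov_x
--                 y_coord = prov_y
--             prov_y += 1
--         prov_x += 1
--     A_second[x_coord][y_coord] = x
--     return A_second
-- ===== SOURCE B (Python) =====
-- def replace_max_array(A, x):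
--     # Two-pass: global max of the flattened array, then first row-major position.
--     flat = [v for row in A for v in row]
--     m = max(flat)
--     i = next(k for k, row in enumerate(A) if m in row)
--     j = A[i].index(m)
--     A[i][j] = x
--     return A
-- ===== Notes on version B (the rewrite author's own statement) =====
-- stated objective: idiomatic
-- what changed: Replaces A's single running-max scan with explicit coordinate counters by a two-pass style: flatten and take the built-in max, then locate its first row-major occurrence via next/enumerate and list.index, and write there.
import Mathlib
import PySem

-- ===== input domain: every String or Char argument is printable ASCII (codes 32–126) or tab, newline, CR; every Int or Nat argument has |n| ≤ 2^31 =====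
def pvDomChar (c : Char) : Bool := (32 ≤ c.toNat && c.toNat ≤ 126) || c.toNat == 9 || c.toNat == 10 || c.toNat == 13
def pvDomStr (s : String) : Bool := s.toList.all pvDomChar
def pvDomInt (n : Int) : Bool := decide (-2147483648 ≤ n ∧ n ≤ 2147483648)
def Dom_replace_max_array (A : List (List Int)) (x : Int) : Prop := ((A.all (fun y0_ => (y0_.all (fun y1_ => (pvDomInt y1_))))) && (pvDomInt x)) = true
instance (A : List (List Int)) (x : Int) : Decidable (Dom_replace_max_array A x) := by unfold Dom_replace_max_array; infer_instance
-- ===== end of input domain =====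

-- B does the same job as a two-pass flatten/max/first-occurrence lookup instead of A's running-max
-- scan with coordinate counters (objective: idiomatic). Both Pythons mutate the shared inner row in
-- place; the equivalence proved here is about the return value.

-- ===== PORT A =====
-- '-inf' sentinel is ported as Option Int: none = float('-inf'); gtb m e = (e > maximum)
def gtb (m : Option Int) (e : Int) : Bool :=
  match m with
  | none => true
  | some v => decide (v < e)

def replace_max_array (A : List (List Int)) (x : Int) : List (List Int) :=
  let A_second := A
  let st :=
    A.foldl
      (fun (s : Nat × Nat × Nat × Option Int) l =>
        match s with
        | (xc, yc, px, m) =>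
          let t :=
            l.foldl
              (fun (t : Nat × Nat × Nat × Option Int) elemen =>
                match t with
                | (xc, yc, py, m) =>
                  if gtb m elemen then (px, py, py + 1, some elemen)
                  else (xc, yc, py + 1, m))
              (xc, yc, 0, m)
          (t.1, t.2.1, px + 1, t.2.2.2))
      (0, 0, 0, none)
  -- A_second[x_coord][y_coord] = x  (in range for every input Pre_ admits)
  A_second.modify st.1 (fun row => row.set st.2.1 x)

-- ===== PORT B =====
def replace_max_array_alt (A : List (List Int)) (x : Int) : List (List Int) :=
  let flat := A.flatMap (fun row => row)
  match PySem.List.max? flat (fun v => v) with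
  | none => A          -- Python raises ValueError here; outside Pre_
  | some m =>
    let i := A.findIdx (fun row => row.contains m)
    match PySem.List.index? (A.getD i []) m with
    | none => A        -- unreachable: row i contains m
    | some j => A.modify i (fun row => row.set j x)

-- ===== PRECONDITION & SPEC =====
-- Pre_ excludes arrays with no elements at all: there A raises IndexError and B raises ValueError.
def Pre_replace_max_array (A : List (List Int)) (x : Int) : Prop :=
  A.flatMap (fun row => row) ≠ []
instance (A : List (List Int)) (x : Int) : Decidable (Pre_replace_max_array A x) := by
  unfold Pre_replace_max_array; infer_instance
def pvWitness_replace_max_array : List (List Int) × Int := ([[1, 3], [2]], 7)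

def Spec_replace_max_array (A : List (List Int)) (x : Int) (out : List (List Int)) : Prop := out = replace_max_array_alt A x
instance (A : List (List Int)) (x : Int) (out : List (List Int)) : Decidable (Spec_replace_max_array A x out) := by unfold Spec_replace_max_array; infer_instance

-- ===== CLAIM (what is proved, stated in full; the proofs are below) =====
def Claim_equal_replace_max_array : Prop := ∀ (A : List (List Int)) (x : Int), Dom_replace_max_array A x → Pre_replace_max_array A x → Spec_replace_max_array A x (replace_max_array A x)

-- ===== LEMMAS AND PROOFS =====

-- right-recursive maximum used as the proofs' reference
def mymax : List Int → Option Int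
  | [] => none
  | e :: r => some (match mymax r with | none => e | some M => max e M)

theorem mymax_eq_none_iff (l : List Int) : mymax l = none ↔ l = [] := by
  cases l <;> simp [mymax]

theorem foldl_max_eq (t : List Int) (x : Int) :
    t.foldl max x = match mymax t with | none => x | some M => max x M := by
  induction t generalizing x with
  | nil => simp [mymax]
  | cons e r ih =>
    simp only [List.foldl_cons, ih, mymax]
    cases mymax r <;> simp [max_assoc]

theorem mymax_mem (l : List Int) (M : Int) (h : mymax l = some M) : M ∈ l := by
  induction l generalizing M with
  | nil => simp [mymax] at h
  | cons e r ih =>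
    simp only [mymax] at h
    cases hr : mymax r with
    | none => simp [hr] at h; simp [h]
    | some Mr =>
      simp only [hr, Option.some.injEq] at h
      rcases max_cases e Mr with ⟨h1, _⟩ | ⟨h1, _⟩ <;> rw [h1] at h <;> subst h
      · exact List.mem_cons_self
      · exact List.mem_cons_of_mem _ (ih Mr hr)

theorem mymax_le (l : List Int) (M : Int) (h : mymax l = some M) :
    ∀ e ∈ l, e ≤ M := by
  induction l generalizing M with
  | nil => simp
  | cons a r ih =>
    simp only [mymax] at h
    intro e he
    cases hr : mymax r with
    | none =>
      rw [(mymax_eq_none_iff r).mp hr] at he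
      simp [hr] at h
      simp at he; omega
    | some Mr =>
      simp only [hr, Option.some.injEq] at h
      rcases List.mem_cons.mp he with rfl | he'
      · omega
      · have := ih Mr hr e he'; omega

theorem mymax_append (a b : List Int) :
    mymax (a ++ b) =
      match mymax a, mymax b with
      | none, mb => mb
      | some Ma, none => some Ma
      | some Ma, some Mb => some (max Ma Mb) := by
  induction a with
  | nil => cases hb : mymax b <;> simp [mymax, hb]
  | cons e r ih =>
    simp only [List.cons_append, mymax, ih]
    cases mymax r <;> cases mymax b <;> simp [max_assoc]

theorem index?_eq_findIdx (l : List Int) (M : Int) (h : M ∈ l) :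
    PySem.List.index? l M = some (l.findIdx (· == M)) := by
  induction l with
  | nil => simp at h
  | cons a r ih =>
    by_cases ha : a = M
    · subst ha
      rw [PySem.List.index?_cons_self]
      simp [List.findIdx_cons]
    · rw [PySem.List.index?_cons_of_ne r ha]
      have hm : M ∈ r := by rcases List.mem_cons.mp h with h' | h' <;> [exact absurd h'.symm ha; exact h']
      rw [ih hm]
      have hne : (a == M) = false := by simp [ha]
      simp [List.findIdx_cons, hne]

-- the inner loop of A over one row, characterised
theorem inner_char (l : List Int) (px xc yc py : Nat) (m : Option Int) :
    l.foldl
      (fun (t : Nat × Nat × Nat × Option Int) elemen =>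
        match t with
        | (xc, yc, py, m) =>
          if gtb m elemen then (px, py, py + 1, some elemen)
          else (xc, yc, py + 1, m))
      (xc, yc, py, m)
    = match mymax l with
      | none => (xc, yc, py + l.length, m)
      | some M =>
        if gtb m M then (px, py + l.findIdx (· == M), py + l.length, some M)
        else (xc, yc, py + l.length, m) := by
  induction l generalizing xc yc py m with
  | nil => simp [mymax]
  | cons e r ih =>
    simp only [List.foldl_cons]
    by_cases hg : gtb m e
    · rw [if_pos hg]
      rw [ih]
      cases hr : mymax r with
      | none =>
        have : r = [] := (mymax_eq_none_iff r).mp hr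
        subst this
        simp [mymax, hg, List.findIdx_cons]
      | some Mr =>
        simp only [mymax, hr]
        by_cases hlt : e < Mr
        · have h1 : gtb (some e) Mr = true := by simp [gtb, hlt]
          have h2 : max e Mr = Mr := by omega
          have h3 : gtb m Mr = true := by cases m with
            | none => rfl
            | some v => simp [gtb] at hg ⊢; omega
          have h4 : (e == Mr) = false := by simp; omega
          simp [h1, h2, h3, List.findIdx_cons, h4]
          all_goals omega
        · have h1 : gtb (some e) Mr = false := by simp [gtb]; omega
          have h2 : max e Mr = e := by omega
          simp [h1, h2, hg, List.findIdx_cons]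
          all_goals omega
    · rw [if_neg hg]
      cases m with
      | none => simp [gtb] at hg
      | some v =>
        have hev : e ≤ v := by simp [gtb] at hg; omega
        rw [ih]
        cases hr : mymax r with
        | none =>
          have : r = [] := (mymax_eq_none_iff r).mp hr
          subst this
          simp [mymax, hg]
        | some Mr =>
          simp only [mymax, hr]
          by_cases hlt : v < Mr
          · have h1 : gtb (some v) Mr = true := by simp [gtb, hlt]
            have h2 : max e Mr = Mr := by omega
            have h4 : (e == Mr) = false := by simp; omega
            simp [h2, gtb, hlt, List.findIdx_cons, h4]
            all_goals omega
          · have h1 : gtb (some v) Mr = false := by simp [gtb]; omega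
            have h2 : gtb (some v) (max e Mr) = false := by simp [gtb]; omega
            simp [h1, h2]
            all_goals omega

-- the outer loop of A, characterised in terms of B's lookups
theorem outer_char (rows : List (List Int)) (xc yc px : Nat) (m : Option Int) :
    rows.foldl
      (fun (s : Nat × Nat × Nat × Option Int) l =>
        match s with
        | (xc, yc, px, m) =>
          let t :=
            l.foldl
              (fun (t : Nat × Nat × Nat × Option Int) elemen =>
                match t with
                | (xc, yc, py, m) =>
                  if gtb m elemen then (px, py, py + 1, some elemen)
                  else (xc, yc, py + 1, m))
              (xc, yc, 0, m)
          (t.1, t.2.1, px + 1, t.2.2.2))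
      (xc, yc, px, m)
    = match mymax (rows.flatMap (fun row => row)) with
      | none => (xc, yc, px + rows.length, m)
      | some M =>
        if gtb m M then
          (px + rows.findIdx (fun l => l.contains M),
           (rows.getD (rows.findIdx (fun l => l.contains M)) []).findIdx (· == M),
           px + rows.length, some M)
        else (xc, yc, px + rows.length, m) := by
  induction rows generalizing xc yc px m with
  | nil => simp [mymax]
  | cons l rest ih =>
    simp only [List.foldl_cons, List.flatMap_cons]
    rw [inner_char]
    rw [mymax_append]
    cases hl : mymax l with
    | none =>
      have hle : l = [] := (mymax_eq_none_iff l).mp hl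
      subst hle
      simp only []
      rw [ih]
      cases hr : mymax (rest.flatMap (fun row => row)) with
      | none => simp; all_goals omega
      | some Mr =>
        by_cases hg : gtb m Mr
        · simp [hg, List.findIdx_cons, List.length_cons]
          all_goals omega
        · simp [hg]
          all_goals omega
    | some Ml =>
      have hmem : Ml ∈ l := mymax_mem l Ml hl
      simp only []
      by_cases hg : gtb m Ml
      · rw [if_pos hg]
        simp only []
        rw [ih]
        cases hr : mymax (rest.flatMap (fun row => row)) with
        | none =>
          simp [hg, List.findIdx_cons, hmem]
          all_goals omega
        | some Mr =>
          simp only []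
          by_cases hlt : Ml < Mr
          · rw [show max Ml Mr = Mr by omega]
            have h1 : gtb (some Ml) Mr = true := by simp [gtb, hlt]
            have h3 : gtb m Mr = true := by cases m with
              | none => rfl
              | some v => simp [gtb] at hg ⊢; omega
            have hnm : Mr ∉ l := fun he =>
              absurd (mymax_le l Ml hl Mr he) (by omega)
            simp [h1, h3, List.findIdx_cons, hnm]
            all_goals omega
          · rw [show max Ml Mr = Ml by omega]
            have h1 : gtb (some Ml) Mr = false := by simp [gtb]; omega
            simp [h1, hg, List.findIdx_cons, hmem]
            all_goals omega
      · rw [if_neg hg]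
        cases m with
        | none => simp [gtb] at hg
        | some v =>
          have hvl : Ml ≤ v := by simp [gtb] at hg; omega
          simp only []
          rw [ih]
          cases hr : mymax (rest.flatMap (fun row => row)) with
          | none =>
            have hnlt : ¬ v < Ml := by omega
            simp [gtb, hnlt]
            all_goals omega
          | some Mr =>
            simp only []
            by_cases hlt : v < Mr
            · rw [show max Ml Mr = Mr by omega]
              have h1 : gtb (some v) Mr = true := by simp [gtb, hlt]
              have hnm : Mr ∉ l := fun he =>
                absurd (mymax_le l Ml hl Mr he) (by omega)
              simp [gtb, hlt, List.findIdx_cons, hnm]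
              all_goals omega
            · have h1 : gtb (some v) Mr = false := by simp [gtb]; omega
              have h2 : gtb (some v) (max Ml Mr) = false := by simp [gtb]; omega
              simp [h1, h2]
              all_goals omega

theorem max?_eq_mymax (l : List Int) :
    PySem.List.max? l (fun v => v) = mymax l := by
  cases l with
  | nil => simp [PySem.List.max?, mymax]
  | cons x t =>
    rw [PySem.List.max?_id_cons, foldl_max_eq]
    simp only [mymax]

-- ===== VERDICT (by name: the statement is the Claim_ definition above) =====
theorem replace_max_array_spec : Claim_equal_replace_max_array := by
  intro A x _ hpre
  unfold Spec_replace_max_array replace_max_array replace_max_array_alt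
  simp only []
  rw [outer_char, max?_eq_mymax]
  cases hM : mymax (A.flatMap (fun row => row)) with
  | none =>
    exact absurd ((mymax_eq_none_iff _).mp hM) hpre
  | some M =>
    have hg : gtb none M = true := rfl
    simp only [hg, if_pos]
    set i := A.findIdx (fun l => l.contains M) with hi
    have hmemflat : M ∈ A.flatMap (fun row => row) := mymax_mem _ M hM
    have hexrow : ∃ l ∈ A, M ∈ l := by
      rcases List.mem_flatMap.mp hmemflat with ⟨l, hl, hMl⟩
      exact ⟨l, hl, hMl⟩
    have hrowmem : M ∈ A.getD i [] := by
      rcases hexrow with ⟨l, hl, hMl⟩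
      have hidx : i < A.length := by
        rw [hi]
        apply List.findIdx_lt_length_of_exists
        exact ⟨l, hl, by simpa using hMl⟩
      have hp := List.findIdx_getElem (p := fun l => l.contains M) (xs := A) (w := hidx)
      have hget : A.getD i [] = A[i] := List.getD_eq_getElem A [] hidx
      rw [hget]
      simp only [← hi] at hp
      simpa using hp
    rw [index?_eq_findIdx _ _ hrowmem]
    simp
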